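-- pv_equiv track=rewrite | github.com/openstack-archive/deb-python-pyeclib | pyeclib/core.py | _validate_and_return_fragment_size
-- ===== SOURCE A (Python) =====
-- def _validate_and_return_fragment_size(fragments):
--   if len(fragments) > 0 and len(fragments[0]) == 0:
--     return -1
--   fragment_len = len(fragments[0])
--
--   for fragment in fragments[1:]:
--     if len(fragment) != fragment_len:
--       return -1
--
--   return fragment_len
-- ===== SOURCE B (Python) =====
-- def _validate_and_return_fragment_size(fragments):
--     lens = [len(f) for f in fragments]
--     mn = min(lens)
--     mx = max(lens)
--     return mn if mn > 0 and mn == mx else -1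
-- ===== Notes on version B (the rewrite author's own statement) =====
-- stated objective: alternative
-- what changed: Replaces the compare-each-length-to-the-first early-exit loop with an extremal characterization: compute min and max of all fragment lengths and return the min iff it is positive and equals the max, else -1.
import Mathlib
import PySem

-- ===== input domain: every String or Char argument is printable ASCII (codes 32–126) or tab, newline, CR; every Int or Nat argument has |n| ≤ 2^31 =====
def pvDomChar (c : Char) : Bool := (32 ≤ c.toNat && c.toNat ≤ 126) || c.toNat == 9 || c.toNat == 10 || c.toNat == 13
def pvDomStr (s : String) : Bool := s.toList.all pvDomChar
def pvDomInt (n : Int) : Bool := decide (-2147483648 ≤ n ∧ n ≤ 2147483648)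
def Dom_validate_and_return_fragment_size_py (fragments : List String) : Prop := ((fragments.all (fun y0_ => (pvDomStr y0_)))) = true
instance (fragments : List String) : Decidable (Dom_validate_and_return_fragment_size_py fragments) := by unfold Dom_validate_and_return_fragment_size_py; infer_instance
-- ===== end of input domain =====

-- B replaces A's compare-each-length-to-the-first early-exit loop by an extremal characterization:
-- min and max of all fragment lengths, returning min iff it is positive and equals max (objective: alternative).
-- Both A and B raise on the empty list (IndexError / ValueError), excluded by Pre_.


-- ===== PORT A =====
-- the 'for fragment in fragments[1:]' loop with its early 'return -1'
def pvGoA (fragment_len : Int) : List String → Int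
  | [] => fragment_len
  | f :: rest => if PySem.Str.len f ≠ fragment_len then -1 else pvGoA fragment_len rest

def validate_and_return_fragment_size_py (fragments : List String) : Int :=
  if 0 < fragments.length ∧ (PySem.List.pyGet? fragments 0).map PySem.Str.len = some 0 then -1
  else
    match PySem.List.pyGet? fragments 0 with
    | none => 0  -- fragments[0] raises IndexError here; excluded by Pre_
    | some f0 => pvGoA (PySem.Str.len f0) (PySem.List.slice fragments (some 1) none)

-- ===== PORT B =====
def validate_and_return_fragment_size_py_alt (fragments : List String) : Int :=
  let lens := fragments.map (fun f => PySem.Str.len f)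
  match PySem.List.min? lens (fun x => x), PySem.List.max? lens (fun x => x) with
  | some mn, some mx => if 0 < mn ∧ mn = mx then mn else -1
  | _, _ => 0  -- min([]) raises ValueError here; excluded by Pre_

-- ===== PRECONDITION & SPEC =====
-- Pre_ excludes only the empty list, on which A raises IndexError (and B ValueError).
def Pre_validate_and_return_fragment_size_py (fragments : List String) : Prop := fragments ≠ []
instance (fragments : List String) : Decidable (Pre_validate_and_return_fragment_size_py fragments) := by unfold Pre_validate_and_return_fragment_size_py; infer_instance

def pvWitness_validate_and_return_fragment_size_py : List String := ["ab", "cd"]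

def Spec_validate_and_return_fragment_size_py (fragments : List String) (out : Int) : Prop := out = validate_and_return_fragment_size_py_alt fragments
instance (fragments : List String) (out : Int) : Decidable (Spec_validate_and_return_fragment_size_py fragments out) := by unfold Spec_validate_and_return_fragment_size_py; infer_instance

-- ===== CLAIM (what is proved, stated in full; the proofs are below) =====
def Claim_equal_validate_and_return_fragment_size_py : Prop := ∀ (fragments : List String), Dom_validate_and_return_fragment_size_py fragments → Pre_validate_and_return_fragment_size_py fragments → Spec_validate_and_return_fragment_size_py fragments (validate_and_return_fragment_size_py fragments)

-- ===== LEMMAS AND PROOFS =====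

-- A's loop returns L iff every remaining length equals L
theorem pvGoA_eq (L : Int) (rest : List String) :
    pvGoA L rest = if ∀ f ∈ rest, PySem.Str.len f = L then L else -1 := by
  induction rest with
  | nil => simp [pvGoA]
  | cons f rest ih =>
    simp only [pvGoA, ih, List.mem_cons, forall_eq_or_imp]
    by_cases h : PySem.Str.len f = L <;> by_cases h2 : ∀ g ∈ rest, PySem.Str.len g = L <;>
      simp_all [PySem.Str.len]

theorem pvFoldlMin_le (ls : List Int) (L : Int) : ls.foldl min L ≤ L := by
  induction ls generalizing L with
  | nil => simp
  | cons x ls ih => exact le_trans (ih (min L x)) (min_le_left _ _)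

theorem pvLe_foldlMax (ls : List Int) (L : Int) : L ≤ ls.foldl max L := by
  induction ls generalizing L with
  | nil => simp
  | cons x ls ih => exact le_trans (le_max_left _ _) (ih (max L x))

theorem pvFoldlMin_le_mem (ls : List Int) (L x : Int) (hx : x ∈ ls) : ls.foldl min L ≤ x := by
  induction ls generalizing L with
  | nil => simp at hx
  | cons y ls ih =>
    rcases List.mem_cons.mp hx with h | h
    · subst h; exact le_trans (pvFoldlMin_le ls (min L x)) (min_le_right _ _)
    · exact ih (min L y) h

theorem pvMem_le_foldlMax (ls : List Int) (L x : Int) (hx : x ∈ ls) : x ≤ ls.foldl max L := by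
  induction ls generalizing L with
  | nil => simp at hx
  | cons y ls ih =>
    rcases List.mem_cons.mp hx with h | h
    · subst h; exact le_trans (le_max_right _ _) (pvLe_foldlMax ls (max L x))
    · exact ih (max L y) h

theorem pvFoldlMin_const (ls : List Int) (L : Int) (h : ∀ x ∈ ls, x = L) : ls.foldl min L = L := by
  induction ls with
  | nil => rfl
  | cons x ls ih =>
    have hx : x = L := h x (by simp)
    simp only [List.foldl_cons, hx, min_self]
    exact ih (fun y hy => h y (by simp [hy]))

theorem pvFoldlMax_const (ls : List Int) (L : Int) (h : ∀ x ∈ ls, x = L) : ls.foldl max L = L := by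
  induction ls with
  | nil => rfl
  | cons x ls ih =>
    have hx : x = L := h x (by simp)
    simp only [List.foldl_cons, hx, max_self]
    exact ih (fun y hy => h y (by simp [hy]))

-- ===== VERDICT (by name: the statement is the Claim_ definition above) =====
theorem validate_and_return_fragment_size_py_spec : Claim_equal_validate_and_return_fragment_size_py := by
  intro fragments _ hpre
  unfold Spec_validate_and_return_fragment_size_py
  cases fragments with
  | nil => exact absurd rfl hpre
  | cons f0 rest =>
    unfold validate_and_return_fragment_size_py validate_and_return_fragment_size_py_alt
    have hget : PySem.List.pyGet? (f0 :: rest) (0 : Int) = some f0 := by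
      simp [PySem.List.pyGet?, PySem.List.pyIdx?]
    rw [hget]
    simp only [Option.map_some, PySem.List.slice_from_one, List.tail_cons, List.length_cons,
      List.map_cons, PySem.List.min?_id_cons, PySem.List.max?_id_cons]
    set L := PySem.Str.len f0 with hL
    set ls := rest.map (fun f => PySem.Str.len f) with hls
    rw [pvGoA_eq]
    have hLnn : 0 ≤ L := by simp [hL, PySem.Str.len]
    by_cases h0 : L = 0
    · -- first fragment empty: A takes the -1 branch; B's min ≤ 0
      rw [if_pos ⟨by omega, by rw [h0]⟩]
      have hmle : ls.foldl min L ≤ 0 := h0 ▸ pvFoldlMin_le ls L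
      rw [if_neg (by omega : ¬(0 < ls.foldl min L ∧ ls.foldl min L = ls.foldl max L))]
    · have hcond : ¬ (0 < rest.length + 1 ∧ some L = some (0 : Int)) := by
        intro ⟨_, hc⟩; exact h0 (Option.some.inj hc)
      rw [if_neg hcond]
      by_cases hall : ∀ f ∈ rest, PySem.Str.len f = L
      · have hall' : ∀ x ∈ ls, x = L := by
          intro x hx; rcases List.mem_map.mp hx with ⟨f, hf, hfx⟩; rw [← hfx]; exact hall f hf
        rw [if_pos hall, pvFoldlMin_const ls L hall', pvFoldlMax_const ls L hall',
          if_pos ⟨by omega, rfl⟩]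
      · -- some length differs from L: min ≠ max
        rw [if_neg hall]
        push_neg at hall
        obtain ⟨f, hf, hfl⟩ := hall
        have hmem : PySem.Str.len f ∈ ls := List.mem_map.mpr ⟨f, hf, rfl⟩
        have h1 := pvFoldlMin_le_mem ls L _ hmem
        have h2 := pvMem_le_foldlMax ls L _ hmem
        have h3 := pvFoldlMin_le ls L
        have h4 := pvLe_foldlMax ls L
        rw [if_neg (by rintro ⟨-, heq⟩; omega)]
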